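-- pv_equiv track=rewrite | github.com/yamkela-macwili/Job-Intelligence-Platform | backend/services/job_matcher.py | _classify_proficiency
-- ===== SOURCE A (Python) =====
-- def _classify_proficiency(skill: str) -> str:
--     """
--     Classify skill proficiency level based on keywords.
--
--     Args:
--         skill: Skill name
--
--     Returns:
--         Proficiency level: expert, advanced, intermediate, or beginner
--     """
--     skill_lower = skill.lower()
--
--     expert_keywords = {"lead", "senior", "architect", "principal"}
--     advanced_keywords = {"expert", "advanced", "proficient", "skilled"}
--     intermediate_keywords = {"intermediate", "working knowledge"}
--
--     if any(keyword in skill_lower for keyword in expert_keywords):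
--         return "expert"
--     elif any(keyword in skill_lower for keyword in advanced_keywords):
--         return "advanced"
--     elif any(keyword in skill_lower for keyword in intermediate_keywords):
--         return "intermediate"
--     else:
--         return "beginner"
-- ===== SOURCE B (Python) =====
-- _RANKED_KEYWORDS = [
--     ("lead", 0), ("senior", 0), ("architect", 0), ("principal", 0),
--     ("expert", 1), ("advanced", 1), ("proficient", 1), ("skilled", 1),
--     ("intermediate", 2), ("working knowledge", 2),
-- ]
-- _LEVELS = ["expert", "advanced", "intermediate", "beginner"]
--
-- def _classify_proficiency(skill: str) -> str:
--     s = skill.lower()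
--     best = 3  # sentinel = beginner
--     for kw, rank in _RANKED_KEYWORDS:
--         if kw in s and rank < best:
--             best = rank
--     return _LEVELS[best]
-- ===== Notes on version B (the rewrite author's own statement) =====
-- stated objective: alternative
-- what changed: Replaced the three-tier short-circuit any()/if-elif chain over keyword sets by a single pass over one flat keyword-to-rank table maintaining a running minimum rank, mapped back to a level name at the end.
import Mathlib
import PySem

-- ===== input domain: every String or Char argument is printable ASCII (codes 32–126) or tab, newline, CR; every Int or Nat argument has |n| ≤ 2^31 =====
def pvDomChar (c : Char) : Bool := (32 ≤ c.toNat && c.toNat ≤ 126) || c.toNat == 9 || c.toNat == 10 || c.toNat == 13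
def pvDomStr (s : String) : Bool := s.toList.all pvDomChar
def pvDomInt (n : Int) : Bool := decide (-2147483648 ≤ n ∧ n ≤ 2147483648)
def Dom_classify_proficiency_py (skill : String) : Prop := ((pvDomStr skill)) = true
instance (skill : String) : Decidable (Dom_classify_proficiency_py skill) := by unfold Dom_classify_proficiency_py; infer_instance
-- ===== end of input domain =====

-- B replaces A's three-tier short-circuit if/elif chain by a single pass over one flat
-- keyword→rank table maintaining a running minimum rank (objective: alternative decomposition).

-- ===== PORT A =====
def classify_proficiency_py (skill : String) : String :=
  let skill_lower := PySem.Str.lower skill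
  if (["lead", "senior", "architect", "principal"].any
        (fun k => PySem.Str.isIn k skill_lower)) then "expert"
  else if (["expert", "advanced", "proficient", "skilled"].any
        (fun k => PySem.Str.isIn k skill_lower)) then "advanced"
  else if (["intermediate", "working knowledge"].any
        (fun k => PySem.Str.isIn k skill_lower)) then "intermediate"
  else "beginner"

-- ===== PORT B =====
def pvRankedKeywords : List (String × Nat) :=
  [("lead", 0), ("senior", 0), ("architect", 0), ("principal", 0),
   ("expert", 1), ("advanced", 1), ("proficient", 1), ("skilled", 1),
   ("intermediate", 2), ("working knowledge", 2)]

def pvLevels : List String := ["expert", "advanced", "intermediate", "beginner"]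

def classify_proficiency_py_alt (skill : String) : String :=
  let s := PySem.Str.lower skill
  let best := pvRankedKeywords.foldl
    (fun best p => if PySem.Str.isIn p.1 s && decide (p.2 < best) then p.2 else best) 3
  pvLevels.getD best ""

-- ===== PRECONDITION & SPEC =====
def Spec_classify_proficiency_py (skill : String) (out : String) : Prop := out = classify_proficiency_py_alt skill
instance (skill : String) (out : String) : Decidable (Spec_classify_proficiency_py skill out) := by unfold Spec_classify_proficiency_py; infer_instance

-- ===== CLAIM (what is proved, stated in full; the proofs are below) =====
def Claim_equal_classify_proficiency_py : Prop := ∀ (skill : String), Dom_classify_proficiency_py skill → Spec_classify_proficiency_py skill (classify_proficiency_py skill)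

-- ===== LEMMAS AND PROOFS =====

-- B's single pass over one rank-r segment of the table: the running minimum after the
-- segment is `min acc r` if any keyword of the segment occurs in s, else `acc`.
lemma pv_seg (s : String) (r : Nat) (kws : List String) (acc : Nat) :
    (kws.map (fun k => (k, r))).foldl
      (fun best p => if PySem.Str.isIn p.1 s && decide (p.2 < best) then p.2 else best) acc
    = if kws.any (fun k => PySem.Str.isIn k s) then min acc r else acc := by
  induction kws generalizing acc with
  | nil => simp
  | cons k t ih =>
    simp only [List.map_cons, List.foldl_cons, List.any_cons]
    rw [ih]
    rcases Bool.eq_false_or_eq_true (PySem.Str.isIn k s) with h | h <;>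
      rcases Bool.eq_false_or_eq_true (t.any (fun k => PySem.Str.isIn k s)) with ht | ht <;>
      simp only [h, ht, Bool.true_and, Bool.false_and, Bool.true_or, Bool.false_or,
        Bool.or_false, Bool.or_true, if_true, if_false, Nat.min_def, decide_eq_true_eq] <;>
      split_ifs <;> first | exact absurd ‹False› id | omega

-- ===== VERDICT (by name: the statement is the Claim_ definition above) =====
theorem classify_proficiency_py_spec : Claim_equal_classify_proficiency_py := by
  intro skill _
  unfold Spec_classify_proficiency_py classify_proficiency_py classify_proficiency_py_alt
  have hsplit : pvRankedKeywords =
      (["lead", "senior", "architect", "principal"].map (fun k => (k, 0))) ++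
      ((["expert", "advanced", "proficient", "skilled"].map (fun k => (k, 1))) ++
       (["intermediate", "working knowledge"].map (fun k => (k, 2)))) := rfl
  rw [hsplit]
  simp only [List.foldl_append, pv_seg]
  cases e1 : ["lead", "senior", "architect", "principal"].any
      (fun k => PySem.Str.isIn k (PySem.Str.lower skill)) <;>
  cases e2 : ["expert", "advanced", "proficient", "skilled"].any
      (fun k => PySem.Str.isIn k (PySem.Str.lower skill)) <;>
  cases e3 : ["intermediate", "working knowledge"].any
      (fun k => PySem.Str.isIn k (PySem.Str.lower skill)) <;>
  simp [pvLevels]
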